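-- pv_equiv track=rewrite | github.com/amymhaddad/algorithmPractice | algoExpert/tandem/tandem.py | v2_tandem
-- ===== SOURCE A (Python) =====
-- def v2_tandem(red, blue, fastest):
--     red.sort(reverse=True)
--     blue.sort(reverse=True)
--
--     totals = []
--
--     i = 0
--     #Why if I extract out the logic into a var name, the program breaks on the
--     #second check for min speeds? BUT if I hard code the logic, it works?
--     #speeds_needed = len(totals) < len(red)
--
--     while len(totals) < len(red):
--         max_val = max(red[i], blue[i])
--         if len(totals) < len(red):
--             totals.append(max_val)
--
--         min_val = min(red[i], blue[i])
--         if len(totals) < len(red):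
--             totals.append(min_val)
--         i += 1
--
--
--     return sum(totals)
-- ===== SOURCE B (Python) =====
-- def _select(xs, k):
--     # Iterative three-way-partition quickselect (middle-element pivot):
--     # returns (sum of the k largest elements of xs, the k-th largest element),
--     # for 1 <= k <= len(xs). Expected O(len(xs)); never sorts.
--     acc = 0
--     while True:
--         pivot = xs[len(xs) // 2]
--         greater = [x for x in xs if x > pivot]
--         if k <= len(greater):
--             xs = greater
--             continue
--         eq = len([x for x in xs if x == pivot])
--         if k <= len(greater) + eq:
--             return acc + sum(greater) + pivot * (k - len(greater)), pivot
--         acc += sum(greater) + pivot * eq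
--         k -= len(greater) + eq
--         xs = [x for x in xs if x < pivot]
--
--
-- def v2_tandem(red, blue, fastest):
--     # Selection instead of sorting: the answer is (sum of the ceil(n/2) largest
--     # of red) + (sum of the ceil(n/2) largest of blue), minus, for odd n, the
--     # smaller of the two ceil(n/2)-th largest values (that middle min is the
--     # rider left without a partner). Unlike A, does not mutate red/blue.
--     n = len(red)
--     if n == 0:
--         return 0
--     k = (n + 1) // 2
--     sr, vr = _select(red, k)
--     sb, vb = _select(blue, k)
--     total = sr + sb
--     if n % 2 == 1:
--         total -= min(vr, vb)
--     return total
-- ===== Notes on version B (the rewrite author's own statement) =====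
-- stated objective: faster
-- what changed: Replaces A's sort-both-lists-then-pair loop by an iterative three-way quickselect: B computes the sum of the top ceil(n/2) elements and the ceil(n/2)-th largest of each list by repeated pivot partitioning (no sorting, no pairing, no intermediate totals list), then subtracts the smaller middle value when n is odd; return value only - A also sorts its arguments in place, B does not mutate them.
import Mathlib
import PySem

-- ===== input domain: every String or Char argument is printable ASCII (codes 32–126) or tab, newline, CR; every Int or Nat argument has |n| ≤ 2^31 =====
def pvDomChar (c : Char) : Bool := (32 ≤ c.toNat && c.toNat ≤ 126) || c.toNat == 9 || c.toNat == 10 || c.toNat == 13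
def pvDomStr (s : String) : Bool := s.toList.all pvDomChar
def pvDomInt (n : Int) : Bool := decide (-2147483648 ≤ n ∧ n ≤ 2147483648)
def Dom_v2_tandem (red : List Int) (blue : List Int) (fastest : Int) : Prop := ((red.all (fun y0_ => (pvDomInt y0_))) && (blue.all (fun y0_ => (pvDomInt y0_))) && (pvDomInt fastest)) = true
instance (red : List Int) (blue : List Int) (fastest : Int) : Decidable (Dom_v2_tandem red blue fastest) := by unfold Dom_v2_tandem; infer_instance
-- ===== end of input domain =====

-- B replaces A's sort-then-pair loop by an iterative quickselect that finds the
-- sum of the top ceil(n/2) elements and the ceil(n/2)-th largest of each list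
-- (no sorting), measured faster; return value only: A sorts its argument lists
-- in place, B does not mutate them.

-- ===== PORT A =====
-- the while-loop of A; fuel = red.length suffices since every iteration appends
-- at least one element to totals and the loop stops once totals is as long as red
def v2_loop (red blue : List Int) (fuel : Nat) (totals : List Int) (i : Nat) : List Int :=
  match fuel with
  | 0 => totals
  | Nat.succ f =>
    if totals.length < red.length then
      let max_val := max (PySem.List.pyGetD red (i : Int) 0) (PySem.List.pyGetD blue (i : Int) 0)
      let t1 := if totals.length < red.length then totals ++ [max_val] else totals
      let min_val := min (PySem.List.pyGetD red (i : Int) 0) (PySem.List.pyGetD blue (i : Int) 0)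
      let t2 := if t1.length < red.length then t1 ++ [min_val] else t1
      v2_loop red blue f t2 (i + 1)
    else totals

def v2_tandem (red : List Int) (blue : List Int) (fastest : Int) : Int :=
  let r := PySem.List.sorted red (fun x => x) true
  let b := PySem.List.sorted blue (fun x => x) true
  (v2_loop r b r.length [] 0).sum

-- ===== PORT B =====
-- the while-loop of B's _select: (sum of k largest, k-th largest) by 3-way partition;
-- fuel = xs.length suffices: every iteration strictly shrinks the list
def selectTop (fuel : Nat) (xs : List Int) (k : Nat) (acc : Int) : Int × Int :=
  match fuel with
  | 0 => (acc, 0)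
  | Nat.succ f =>
    if xs = [] then (acc, 0)  -- Python raises IndexError here; unreachable when 1 ≤ k ≤ len
    else
      let pivot := PySem.List.pyGetD xs ((xs.length / 2 : Nat) : Int) 0
      let g := xs.filter (fun x => decide (pivot < x))
      if k ≤ g.length then selectTop f g k acc
      else
        let e := (xs.filter (fun x => decide (x = pivot))).length
        if k ≤ g.length + e then (acc + g.sum + pivot * ((k : Int) - (g.length : Int)), pivot)
        else selectTop f (xs.filter (fun x => decide (x < pivot))) (k - g.length - e)
              (acc + g.sum + pivot * (e : Int))

def v2_tandem_alt (red : List Int) (blue : List Int) (fastest : Int) : Int :=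
  let n := red.length
  if n = 0 then 0
  else
    let k := (n + 1) / 2
    let sr := selectTop red.length red k 0
    let sb := selectTop blue.length blue k 0
    let total := sr.1 + sb.1
    if n % 2 = 1 then total - min sr.2 sb.2 else total

-- ===== PRECONDITION & SPEC =====
-- Pre_ is exactly A's no-exception domain: A (and B's Python alike) raises IndexError
-- on blue[i] when blue is shorter than ceil(len(red)/2), i.e. when 2*len(blue) < len(red).
def Pre_v2_tandem (red : List Int) (blue : List Int) (fastest : Int) : Prop :=
  red.length ≤ 2 * blue.length
instance (red : List Int) (blue : List Int) (fastest : Int) : Decidable (Pre_v2_tandem red blue fastest) := by unfold Pre_v2_tandem; infer_instance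
def pvWitness_v2_tandem : List Int × List Int × Int := ([5, 1, 4], [3, 2, 9], 0)

def Spec_v2_tandem (red : List Int) (blue : List Int) (fastest : Int) (out : Int) : Prop := out = v2_tandem_alt red blue fastest
instance (red : List Int) (blue : List Int) (fastest : Int) (out : Int) : Decidable (Spec_v2_tandem red blue fastest out) := by unfold Spec_v2_tandem; infer_instance

-- ===== CLAIM (what is proved, stated in full; the proofs are below) =====
def Claim_equal_v2_tandem : Prop := ∀ (red : List Int) (blue : List Int) (fastest : Int), Dom_v2_tandem red blue fastest → Pre_v2_tandem red blue fastest → Spec_v2_tandem red blue fastest (v2_tandem red blue fastest)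

-- ===== LEMMAS AND PROOFS =====
def dsort (xs : List Int) : List Int := PySem.List.sorted xs (fun x => x) true

theorem dsort_perm (xs : List Int) : (dsort xs).Perm xs := PySem.List.sorted_perm xs _ _
theorem dsort_length (xs : List Int) : (dsort xs).length = xs.length := (dsort_perm xs).length_eq
theorem dsort_pairwise (xs : List Int) : (dsort xs).Pairwise (fun a b => b ≤ a) :=
  PySem.List.sorted_pairwise_rev xs (fun x => x)

theorem count_filter_zero (xs : List Int) (p : Int → Bool) (a : Int) (h : p a = false) :
    List.count a (xs.filter p) = 0 :=
  List.count_eq_zero.mpr (fun hm => by simp [List.mem_filter, h] at hm)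

theorem part_perm (xs : List Int) (p : Int) :
    (xs.filter (fun x => decide (p < x)) ++ (xs.filter (fun x => decide (x = p))
      ++ xs.filter (fun x => decide (x < p)))).Perm xs := by
  rw [List.perm_iff_count]
  intro a
  simp only [List.count_append]
  rcases lt_trichotomy a p with h | h | h
  · rw [count_filter_zero xs (fun x => decide (p < x)) a (by simp only [decide_eq_false_iff_not]; omega),
      count_filter_zero xs (fun x => decide (x = p)) a (by simp only [decide_eq_false_iff_not]; omega),
      List.count_filter (by simp only [decide_eq_true_eq]; omega)]
    omega
  · rw [count_filter_zero xs (fun x => decide (p < x)) a (by simp only [decide_eq_false_iff_not]; omega),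
      List.count_filter (p := fun x => decide (x = p)) (by simp only [decide_eq_true_eq]; omega),
      count_filter_zero xs (fun x => decide (x < p)) a (by simp only [decide_eq_false_iff_not]; omega)]
    omega
  · rw [count_filter_zero xs (fun x => decide (x = p)) a (by simp only [decide_eq_false_iff_not]; omega),
      count_filter_zero xs (fun x => decide (x < p)) a (by simp only [decide_eq_false_iff_not]; omega),
      List.count_filter (p := fun x => decide (p < x)) (by simp only [decide_eq_true_eq]; omega)]
    omega

-- three-way partition of the descending sort at a pivot p
theorem dsort_decomp (xs : List Int) (p : Int) :
    dsort xs = dsort (xs.filter (fun x => decide (p < x)))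
      ++ (xs.filter (fun x => decide (x = p))
      ++ dsort (xs.filter (fun x => decide (x < p)))) := by
  apply List.Perm.eq_of_pairwise (le := fun a b : Int => b ≤ a)
    (fun a b _ _ h1 h2 => le_antisymm h2 h1)
  · exact dsort_pairwise xs
  · rw [List.pairwise_append]
    refine ⟨dsort_pairwise _, ?_, ?_⟩
    · rw [List.pairwise_append]
      refine ⟨?_, dsort_pairwise _, ?_⟩
      · exact List.pairwise_of_forall_mem_list (fun a ha b hb => by
          have := (List.mem_filter.mp ha).2
          have := (List.mem_filter.mp hb).2
          simp_all)
      · intro a ha b hb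
        have ha' := (List.mem_filter.mp ha).2
        have hb' := (List.mem_filter.mp ((dsort_perm _).mem_iff.mp hb)).2
        simp only [decide_eq_true_eq] at ha' hb'
        omega
    · intro a ha b hb
      have ha' := (List.mem_filter.mp ((dsort_perm _).mem_iff.mp ha)).2
      simp only [decide_eq_true_eq] at ha'
      rcases List.mem_append.mp hb with hb | hb
      · have hb' := (List.mem_filter.mp hb).2
        simp only [decide_eq_true_eq] at hb'
        omega
      · have hb' := (List.mem_filter.mp ((dsort_perm _).mem_iff.mp hb)).2
        simp only [decide_eq_true_eq] at hb'
        omega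
  · refine (dsort_perm xs).trans ?_
    refine ((part_perm xs p).symm).trans ?_
    exact ((dsort_perm _).symm.append ((List.Perm.refl _).append (dsort_perm _).symm))


theorem selectTop_spec (fuel : Nat) (xs : List Int) (k : Nat) (acc : Int)
    (hn : xs.length ≤ fuel) (h1 : 1 ≤ k) (h2 : k ≤ xs.length) :
    selectTop fuel xs k acc = (acc + ((dsort xs).take k).sum, (dsort xs).getD (k - 1) 0) := by
  induction fuel generalizing xs k acc with
  | zero => omega
  | succ f ih =>
    have hx : xs ≠ [] := by intro h; subst h; simp at h2; omega
    have hlt : xs.length / 2 < xs.length := Nat.div_lt_self (List.length_pos_of_ne_nil hx) (by norm_num)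
    set p := PySem.List.pyGetD xs ((xs.length / 2 : Nat) : Int) 0 with hpdef
    have hp : p ∈ xs := by
      rw [hpdef, PySem.List.pyGetD_natCast, List.getD_eq_getElem _ _ hlt]
      exact List.getElem_mem hlt
    set g := xs.filter (fun x => decide (p < x)) with hgdef
    set eL := xs.filter (fun x => decide (x = p)) with hedef
    set l := xs.filter (fun x => decide (x < p)) with hldef
    have hlen : g.length + (eL.length + l.length) = xs.length := by
      have := (part_perm xs p).length_eq
      simpa using this
    have hgl : g.length < xs.length := by
      have : p ∉ g := by simp [hgdef, List.mem_filter]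
      exact List.length_filter_lt_length_iff_exists.mpr ⟨p, hp, by simp⟩
    have hll : l.length < xs.length := by
      exact List.length_filter_lt_length_iff_exists.mpr ⟨p, hp, by simp⟩
    have hepos : 1 ≤ eL.length :=
      List.length_pos_of_mem (List.mem_filter.mpr ⟨hp, by simp⟩)
    have erep : eL = List.replicate eL.length p :=
      List.eq_replicate_of_mem (fun b hb => by
        have := (List.mem_filter.mp hb).2; simpa using this)
    have hdec : dsort xs = dsort g ++ (eL ++ dsort l) := dsort_decomp xs p
    rw [show selectTop (f+1) xs k acc =
      (if k ≤ g.length then selectTop f g k acc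
       else if k ≤ g.length + eL.length then
        (acc + g.sum + p * ((k : Int) - (g.length : Int)), p)
       else selectTop f l (k - g.length - eL.length) (acc + g.sum + p * (eL.length : Int)))
      from by simp only [selectTop, if_neg hx]; rfl]
    by_cases hk1 : k ≤ g.length
    · rw [if_pos hk1, ih g k acc (by omega) h1 (by omega)]
      have hkg : k ≤ (dsort g).length := by rw [dsort_length]; omega
      rw [hdec, List.take_append_of_le_length hkg,
        List.getD_append _ _ _ _ (by rw [dsort_length]; omega)]
    · rw [if_neg hk1]
      by_cases hk2 : k ≤ g.length + eL.length
      · rw [if_pos hk2]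
        rw [hdec, List.take_append, List.take_of_length_le (by rw [dsort_length]; omega),
          List.take_append_of_le_length (by rw [dsort_length]; omega)]
        have hmin : min (k - (dsort g).length) eL.length = k - g.length := by
          rw [dsort_length]; omega
        simp only [Prod.mk.injEq]
        refine ⟨?_, ?_⟩
        · rw [List.sum_append, (dsort_perm g).sum_eq, erep, List.take_replicate,
            List.length_replicate] at *
          rw [hmin, List.sum_replicate_int]
          push_cast [Nat.cast_sub (by omega : g.length ≤ k)]
          ring
        · rw [List.getD_append_right _ _ _ _ (by rw [dsort_length]; omega),
            List.getD_append _ _ _ _ (by rw [dsort_length]; omega), erep]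
          exact (List.getD_replicate _ (by rw [dsort_length]; omega)).symm
      · rw [if_neg hk2]
        rw [ih l (k - g.length - eL.length) _ (by omega) (by omega) (by omega)]
        have hkdg : k - (dsort g).length - eL.length = k - g.length - eL.length := by
          rw [dsort_length]
        rw [hdec, List.take_append, List.take_of_length_le (l := dsort g) (by rw [dsort_length]; omega),
          List.take_append, List.take_of_length_le (l := eL) (by rw [dsort_length]; omega)]
        simp only [Prod.mk.injEq]
        refine ⟨?_, ?_⟩
        · rw [List.sum_append, List.sum_append, (dsort_perm g).sum_eq]
          have hesum : eL.sum = (eL.length : Int) * p := by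
            rw [erep, List.sum_replicate_int, List.length_replicate]
          rw [hesum, hkdg]
          ring
        · rw [List.getD_append_right _ _ _ _ (by rw [dsort_length]; omega),
            List.getD_append_right _ _ _ _ (by rw [dsort_length]; omega)]
          congr 1
          rw [dsort_length]
          omega

theorem pvFlatMapCast (l : List Nat) :
    List.flatMap (fun a => [((a : Nat) : Int)]) l = l.map (fun a => ((a : Nat) : Int)) := by
  induction l with
  | nil => rfl
  | cons x xs ih => simp [List.flatMap_cons, ih]

-- once totals is as long as red, the loop returns totals unchanged
theorem v2_loop_done (red blue : List Int) (fuel : Nat) (totals : List Int) (i : Nat)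
    (h : red.length ≤ totals.length) : v2_loop red blue fuel totals i = totals := by
  cases fuel with
  | zero => rfl
  | succ f => simp [v2_loop, Nat.not_lt.mpr h]

-- the loop invariant: with totals.length = 2*i, the final sum is totals.sum plus
-- the pair sums for indices i..(n/2 - 1) plus the middle max when n is odd
theorem v2_loop_sum (r b : List Int) (fuel i : Nat) (totals : List Int)
    (hlen : totals.length = 2 * i) (hle : 2 * i ≤ r.length)
    (hfuel : r.length ≤ fuel + 2 * i) :
    (v2_loop r b fuel totals i).sum =
      totals.sum
      + ((List.range' i (r.length / 2 - i)).map
          (fun j => PySem.List.pyGetD r (j : Int) 0 + PySem.List.pyGetD b (j : Int) 0)).sum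
      + (if r.length % 2 = 1 then
          max (PySem.List.pyGetD r ((r.length / 2 : Nat) : Int) 0)
              (PySem.List.pyGetD b ((r.length / 2 : Nat) : Int) 0)
        else 0) := by
  induction fuel generalizing i totals with
  | zero =>
    have h2 : 2 * i = r.length := le_antisymm hle (by omega)
    have hodd : r.length % 2 = 0 := by omega
    have : r.length / 2 - i = 0 := by omega
    simp [v2_loop, this, hodd]
  | succ f ih =>
    by_cases hcont : totals.length < r.length
    · rw [show v2_loop r b (f + 1) totals i =
        (let max_val := max (PySem.List.pyGetD r (i : Int) 0) (PySem.List.pyGetD b (i : Int) 0)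
         let t1 := if totals.length < r.length then totals ++ [max_val] else totals
         let min_val := min (PySem.List.pyGetD r (i : Int) 0) (PySem.List.pyGetD b (i : Int) 0)
         let t2 := if t1.length < r.length then t1 ++ [min_val] else t1
         v2_loop r b f t2 (i + 1)) from by simp [v2_loop, hcont]]
      simp only [if_pos hcont]
      by_cases h2 : totals.length + 1 < r.length
      · -- a full pair max, min is appended
        rw [if_pos (by simpa using h2)]
        rw [ih (i + 1) _ (by simp [hlen]; omega) (by omega) (by omega)]
        have hi : i < r.length / 2 := by omega
        have hrange : List.range' i (r.length / 2 - i) =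
            i :: List.range' (i + 1) (r.length / 2 - (i + 1)) := by
          rw [show r.length / 2 - i = (r.length / 2 - (i + 1)) + 1 by omega]
          rw [List.range'_succ]
        rw [hrange]
        simp only [List.map_cons, List.sum_cons, List.sum_append, List.sum_nil,
          List.flatMap_cons, List.map_append, List.pure_def,
          List.bind_eq_flatMap]
        simp
        linarith [max_add_min (r[i]?.getD (0 : Int)) (b[i]?.getD (0 : Int))]
      · -- last element of an odd-length red: only the max is appended
        have hn : totals.length + 1 = r.length := by omega
        rw [if_neg (by simp; omega)]
        rw [v2_loop_done r b f _ _ (by simp; omega)]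
        have hodd : r.length % 2 = 1 := by omega
        have hi2 : i = r.length / 2 := by omega
        have : r.length / 2 - i = 0 := by omega
        simp [List.sum_append, hodd, hi2]
    · rw [v2_loop_done r b (f + 1) totals i (by omega)]
      have h2 : 2 * i = r.length := by omega
      have hodd : r.length % 2 = 0 := by omega
      have : r.length / 2 - i = 0 := by omega
      simp [this, hodd]

-- prefix sums of a list via Python indexing
theorem sum_map_pyGetD_range' (s : List Int) (m : Nat) (hm : m ≤ s.length) :
    ((List.range' 0 m).map (fun j => PySem.List.pyGetD s ((j : Nat) : Int) 0)).sum
      = (s.take m).sum := by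
  induction m with
  | zero => simp
  | succ m ih =>
    rw [List.range'_concat, List.map_append, List.sum_append,
      ih (by omega)]
    have hmlt : m < s.length := by omega
    rw [List.sum_take_succ s m hmlt]
    simp [PySem.List.pyGetD_natCast, List.getElem?_eq_getElem hmlt]

-- ===== VERDICT (by name: the statement is the Claim_ definition above) =====
theorem v2_tandem_spec : Claim_equal_v2_tandem := by
  intro red blue fastest _ hpre
  unfold Spec_v2_tandem v2_tandem v2_tandem_alt
  simp only
  by_cases h0 : red.length = 0
  · have : red = [] := List.eq_nil_of_length_eq_zero h0
    subst this
    rfl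
  · rw [if_neg h0]
    have hb2 : red.length ≤ 2 * blue.length := hpre
    set n := red.length with hn
    set k := (n + 1) / 2 with hk
    have hk1 : 1 ≤ k := by omega
    have hkr : k ≤ red.length := by omega
    have hkb : k ≤ blue.length := by omega
    rw [selectTop_spec red.length red k 0 (le_refl _) hk1 hkr,
      selectTop_spec blue.length blue k 0 (le_refl _) hk1 hkb]
    have hr : (dsort red).length = n := dsort_length red
    have hbl : (dsort blue).length = blue.length := dsort_length blue
    have hloop := v2_loop_sum (dsort red) (dsort blue) (dsort red).length 0 []
      (by simp) (by omega) (by omega)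
    show (v2_loop (dsort red) (dsort blue) (dsort red).length [] 0).sum = _
    rw [hloop]
    simp only [List.sum_nil, zero_add, Nat.sub_zero, List.pure_def,
      List.bind_eq_flatMap, pvFlatMapCast, List.map_map, Function.comp_def]
    rw [show ((fun j : Nat => PySem.List.pyGetD (dsort red) ((j : Nat) : Int) 0
          + PySem.List.pyGetD (dsort blue) ((j : Nat) : Int) 0))
        = (fun j : Nat => (fun j : Nat => PySem.List.pyGetD (dsort red) ((j : Nat) : Int) 0) j
          + (fun j : Nat => PySem.List.pyGetD (dsort blue) ((j : Nat) : Int) 0) j) from rfl,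
      PySem.List.sum_map_add_int,
      sum_map_pyGetD_range' (dsort red) _ (by omega),
      sum_map_pyGetD_range' (dsort blue) _ (by omega)]
    set m := (dsort red).length / 2 with hm
    have hmn : m = n / 2 := by rw [hm, hr]
    by_cases hodd : n % 2 = 1
    · have hkm : k = m + 1 := by omega
      rw [if_pos (by omega : (dsort red).length % 2 = 1), hkm,
        List.sum_take_succ _ _ (by omega : m < (dsort red).length),
        List.sum_take_succ _ _ (by omega : m < (dsort blue).length),
        if_pos hodd]
      have hgr : PySem.List.pyGetD (dsort red) ((m : Nat) : Int) 0 = (dsort red)[m]'(by omega) := by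
        rw [PySem.List.pyGetD_natCast, List.getD_eq_getElem _ _ (by omega)]
      have hgb : PySem.List.pyGetD (dsort blue) ((m : Nat) : Int) 0 = (dsort blue)[m]'(by omega) := by
        rw [PySem.List.pyGetD_natCast, List.getD_eq_getElem _ _ (by omega)]
      have hdr : (dsort red).getD (m + 1 - 1) 0 = (dsort red)[m]'(by omega) := by
        rw [Nat.add_sub_cancel, List.getD_eq_getElem _ _ (by omega)]
      have hdb : (dsort blue).getD (m + 1 - 1) 0 = (dsort blue)[m]'(by omega) := by
        rw [Nat.add_sub_cancel, List.getD_eq_getElem _ _ (by omega)]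
      rw [hgr, hgb, hdr, hdb]
      rcases le_total ((dsort red)[m]'(by omega)) ((dsort blue)[m]'(by omega)) with h | h
      · rw [max_eq_right h, min_eq_left h]; ring
      · rw [max_eq_left h, min_eq_right h]; ring
    · have hkm : k = m := by omega
      rw [if_neg (by omega : ¬ (dsort red).length % 2 = 1), if_neg hodd, hkm]
      ring
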